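-- pv_equiv track=rewrite | github.com/vukasinjockovic/fitness-ebooks | scrapers/generators/fix_diet_tags.py | _text_contains_keyword
-- ===== SOURCE A (Python) =====
-- def _text_contains_keyword(text: str, keywords: list[str], exceptions: list[str]) -> list[str]:
--     """Check if text contains any keyword, excluding exceptions.
--
--     Returns list of matched keywords.
--     """
--     text_lower = text.lower()
--
--     # First check if any exception applies (if so, mask those regions)
--     exception_ranges = []
--     for exc in exceptions:
--         start = 0
--         while True:
--             pos = text_lower.find(exc, start)
--             if pos == -1:
--                 break
--             exception_ranges.append((pos, pos + len(exc)))
--             start = pos + 1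
--
--     matches = []
--     for kw in keywords:
--         start = 0
--         while True:
--             pos = text_lower.find(kw, start)
--             if pos == -1:
--                 break
--             # Check if this match is within an exception range
--             in_exception = False
--             for exc_start, exc_end in exception_ranges:
--                 if exc_start <= pos < exc_end or exc_start < pos + len(kw) <= exc_end:
--                     in_exception = True
--                     break
--             if not in_exception:
--                 matches.append(kw)
--                 break  # One match per keyword is enough
--             start = pos + 1
--
--     return matches
-- ===== SOURCE B (Python) =====
-- def _text_contains_keyword(text: str, keywords: list[str], exceptions: list[str]) -> list[str]:
--     """Check if text contains any keyword, excluding exceptions.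
--
--     Returns list of matched keywords.
--     """
--     t = text.lower()
--     n = len(t)
--     # reach[i] = i + length of the longest exception occurring at position i (0 if none)
--     reach = [i + max((len(e) for e in exceptions if t[i:i + len(e)] == e), default=0)
--              for i in range(n)]
--     # cov[i]: position i lies strictly inside some exception occurrence (prefix-max sweep)
--     cov = []
--     far = 0
--     for i in range(n):
--         if reach[i] > far:
--             far = reach[i]
--         cov.append(far > i)
--
--     def free(i):
--         return not (0 <= i < n and cov[i])
--
--     matches = []
--     for kw in keywords:
--         L = len(kw)
--         if any(t[p:p + L] == kw and free(p) and free(p + L - 1) for p in range(n - L + 1)):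
--             matches.append(kw)
--     return matches
-- ===== Notes on version B (the rewrite author's own statement) =====
-- stated objective: faster
-- what changed: A collects a list of all exception (start,end) ranges and rescans that whole list for every keyword occurrence found by repeated str.find; B instead builds a boolean coverage mask over text positions once (longest exception match per position + a prefix-maximum sweep) and tests each candidate keyword occurrence with two O(1) mask lookups, so the per-occurrence scan over all exception ranges disappears.
import Mathlib
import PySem

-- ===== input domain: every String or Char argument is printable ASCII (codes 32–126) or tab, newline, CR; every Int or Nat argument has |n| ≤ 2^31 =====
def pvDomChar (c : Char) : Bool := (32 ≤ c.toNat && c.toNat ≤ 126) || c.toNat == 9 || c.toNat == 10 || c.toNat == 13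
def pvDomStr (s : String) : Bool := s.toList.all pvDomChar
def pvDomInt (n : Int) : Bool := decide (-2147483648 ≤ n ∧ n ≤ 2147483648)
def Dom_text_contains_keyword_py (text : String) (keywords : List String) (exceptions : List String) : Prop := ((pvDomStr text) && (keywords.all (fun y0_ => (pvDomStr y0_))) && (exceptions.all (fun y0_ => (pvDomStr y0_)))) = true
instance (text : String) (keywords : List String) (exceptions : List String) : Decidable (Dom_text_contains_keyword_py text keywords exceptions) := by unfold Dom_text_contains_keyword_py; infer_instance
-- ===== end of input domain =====

-- B replaces A's "list of exception ranges, rescanned for every keyword occurrence" by a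
-- coverage mask over text positions built once with a prefix-maximum sweep (alternative
-- decomposition; return values proved identical on the whole domain).

-- ===== PORT A =====

-- facts about `s.find(sub, start)` that A's while-loops need for termination (cited in decreasing_by)
theorem pvFindFrom_eq (t exc : List Char) (k : Nat) :
    PySem.Chars.findFrom t exc (k:Int) none =
      if (t.length:Int) < k then -1 else
      (if PySem.Chars.find (List.drop k t) exc = -1 then -1 else k + PySem.Chars.find (List.drop k t) exc) := by
  have h0 : ¬ ((k:Int) < 0) := by omega
  simp [PySem.Chars.findFrom, h0, Int.toNat_natCast]

theorem pvFindFrom_bounds (t exc : List Char) (k : Nat)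
    (h : PySem.Chars.findFrom t exc (k:Int) none ≠ -1) :
    k ≤ t.length ∧ (k:Int) ≤ PySem.Chars.findFrom t exc (k:Int) none ∧
      (PySem.Chars.findFrom t exc (k:Int) none).toNat ≤ t.length := by
  rw [pvFindFrom_eq] at h ⊢
  split_ifs at h ⊢ with h1 h2
  · exact absurd rfl h
  · exact absurd rfl h
  · have hle := PySem.Chars.find_le_length (List.drop k t) exc
    have hge : (0:Int) ≤ PySem.Chars.find (List.drop k t) exc := by
      have := PySem.Chars.neg_one_le_find (List.drop k t) exc
      omega
    simp [List.length_drop] at hle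
    exact ⟨by omega, by omega, by omega⟩

-- A's inner `while True: pos = text_lower.find(exc, start) …` collecting (pos, pos+len(exc))
def pvExcScanA (t exc : List Char) (start : Nat) : List (Int × Int) :=
  let pos := PySem.Chars.findFrom t exc (start : Int) none
  if h : pos = -1 then []
  else (pos, pos + (exc.length : Int)) :: pvExcScanA t exc (pos.toNat + 1)
termination_by t.length + 1 - start
decreasing_by
  have := pvFindFrom_bounds t exc start h
  omega

-- A's `while True: pos = text_lower.find(kw, start) …` with the in_exception scan (break = any) and the two breaks
def pvKwScanA (t kw : List Char) (ranges : List (Int × Int)) (start : Nat) : Bool :=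
  let pos := PySem.Chars.findFrom t kw (start : Int) none
  if h : pos = -1 then false
  else if ranges.any (fun r =>
      (decide (r.1 ≤ pos) && decide (pos < r.2)) ||
      (decide (r.1 < pos + (kw.length : Int)) && decide (pos + (kw.length : Int) ≤ r.2))) then
    pvKwScanA t kw ranges (pos.toNat + 1)
  else true
termination_by t.length + 1 - start
decreasing_by
  have := pvFindFrom_bounds t kw start h
  omega

def text_contains_keyword_py (text : String) (keywords : List String) (exceptions : List String) : List String :=
  let t := PySem.Chars.lower text.toList
  let ranges := exceptions.foldl (fun acc exc => acc ++ pvExcScanA t exc.toList 0) []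
  keywords.foldl (fun ms kw => if pvKwScanA t kw.toList ranges 0 then ms ++ [kw] else ms) []

-- ===== PORT B =====

-- reach = [i + max((len(e) for e in exceptions if t[i:i+len(e)] == e), default=0) for i in range(n)]
def pvReachB (t : List Char) (exceptions : List String) (n : Int) : List Int :=
  (PySem.List.pyRange 0 n).map (fun i =>
    i + PySem.List.maxD
      ((exceptions.filter (fun e =>
          PySem.List.slice t (some i) (some (i + PySem.Str.len e)) = e.toList)).map
        (fun e => PySem.Str.len e))
      (fun x => x) 0)

-- cov = []; far = 0; for i in range(n): if reach[i] > far: far = reach[i]; cov.append(far > i)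
def pvCovB (reach : List Int) (n : Int) : List Bool :=
  ((PySem.List.pyRange 0 n).foldl (fun st i =>
    let far := if PySem.List.pyGetD reach i 0 > st.1 then PySem.List.pyGetD reach i 0 else st.1
    (far, st.2 ++ [decide (far > i)])) ((0 : Int), ([] : List Bool))).2

-- def free(i): return not (0 <= i < n and cov[i])
def pvFreeB (cov : List Bool) (n : Int) (i : Int) : Bool :=
  !(decide (0 ≤ i) && decide (i < n) && PySem.List.pyGetD cov i false)

-- max(xs, default=0) compared against a nonnegative bound

def text_contains_keyword_py_alt (text : String) (keywords : List String) (exceptions : List String) : List String :=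
  let t := PySem.Chars.lower text.toList
  let n : Int := PySem.Chars.len t
  let reach := pvReachB t exceptions n
  let cov := pvCovB reach n
  keywords.foldl (fun ms kw =>
    let L : Int := PySem.Str.len kw
    if (PySem.List.pyRange 0 (n - L + 1)).any (fun p =>
        decide (PySem.List.slice t (some p) (some (p + L)) = kw.toList) &&
        pvFreeB cov n p && pvFreeB cov n (p + L - 1)) then
      ms ++ [kw]
    else ms) []

-- ===== PRECONDITION & SPEC =====
def Spec_text_contains_keyword_py (text : String) (keywords : List String) (exceptions : List String) (out : List String) : Prop := out = text_contains_keyword_py_alt text keywords exceptions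
instance (text : String) (keywords : List String) (exceptions : List String) (out : List String) : Decidable (Spec_text_contains_keyword_py text keywords exceptions out) := by unfold Spec_text_contains_keyword_py; infer_instance

-- ===== CLAIM (what is proved, stated in full; the proofs are below) =====
def Claim_equal_text_contains_keyword_py : Prop := ∀ (text : String) (keywords : List String) (exceptions : List String), Dom_text_contains_keyword_py text keywords exceptions → Spec_text_contains_keyword_py text keywords exceptions (text_contains_keyword_py text keywords exceptions)

-- ===== LEMMAS AND PROOFS =====

-- `e` occurs in `t` at position p, entirely inside the text
def pvOccAt (t e : List Char) (p : Nat) : Prop := p + e.length ≤ t.length ∧ e <+: t.drop p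

-- no occurrence at any p ≥ start when findFrom = -1

-- position i lies inside some occurrence of some exception string
def pvCovered (t : List Char) (excs : List String) (i : Int) : Prop :=
  ∃ exc ∈ excs, ∃ j : Nat, pvOccAt t exc.toList j ∧ (j:Int) ≤ i ∧ i < (j:Int) + exc.toList.length

-- a keyword is reported iff some occurrence has start and last position both uncovered
def pvGood (t : List Char) (excs : List String) (kw : List Char) : Prop :=
  ∃ p : Nat, pvOccAt t kw p ∧
    ¬ (pvCovered t excs (p:Int) ∨ pvCovered t excs ((p:Int) + kw.length - 1))

-- when find(…, start) = -1 there is no occurrence at or after start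
theorem pvNoOcc (t exc : List Char) (start : Nat)
    (h : PySem.Chars.findFrom t exc (start:Int) none = -1)
    (p : Nat) (hsp : start ≤ p) : ¬ pvOccAt t exc p := by
  rintro ⟨hlen, hpre⟩
  by_cases hk : start ≤ t.length
  · have hni := (PySem.Chars.findFrom_natCast_eq_neg_one_iff t exc start hk).1 h
    apply hni
    rw [← PySem.Chars.isIn_iff_infix, ← PySem.Chars.exists_prefix_drop_iff_isIn]
    exact ⟨p - start, by rwa [List.drop_drop, Nat.add_sub_cancel' hsp]⟩
  · omega

theorem pvExcScanA_mem (t exc : List Char) (start : Nat) (r : Int × Int) :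
    r ∈ pvExcScanA t exc start ↔
      ∃ p : Nat, start ≤ p ∧ pvOccAt t exc p ∧ r = ((p:Int), (p:Int) + exc.length) := by
  rw [pvExcScanA]
  by_cases h : PySem.Chars.findFrom t exc (start:Int) none = -1
  · simp only [h, dite_true, List.not_mem_nil, false_iff]
    rintro ⟨p, hsp, hocc, -⟩
    exact pvNoOcc t exc start h p hsp hocc
  · obtain ⟨hk, hge, hle⟩ := pvFindFrom_bounds t exc start h
    have spec := PySem.Chars.findFrom_natCast_spec t exc start hk h
    set pos := PySem.Chars.findFrom t exc (start:Int) none with hpos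
    have hposN : ((pos.toNat : Int)) = pos := Int.toNat_of_nonneg (by omega)
    rw [dif_neg h]
    rw [List.mem_cons, pvExcScanA_mem t exc (pos.toNat + 1) r]
    constructor
    · rintro (rfl | ⟨p, hsp, hocc, rfl⟩)
      · refine ⟨pos.toNat, by omega, ⟨?_, spec.2.1⟩, by rw [hposN]⟩
        have hl2 := spec.2.1.length_le
        simp only [List.length_drop] at hl2
        omega
      · exact ⟨p, by omega, hocc, rfl⟩
    · rintro ⟨p, hsp, hocc, rfl⟩
      by_cases hp : pos.toNat + 1 ≤ p
      · exact Or.inr ⟨p, hp, hocc, rfl⟩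
      · have hpe : p = pos.toNat := by
          rcases Nat.lt_or_ge p pos.toNat with hlt | hge2
          · exact absurd hocc.2 (spec.2.2 p hsp hlt)
          · omega
        subst hpe
        left; rw [hposN]
termination_by t.length + 1 - start
decreasing_by
  have := pvFindFrom_bounds t exc start h
  omega

theorem pvRanges_mem (t : List Char) (excs : List String) (r : Int × Int) :
    r ∈ excs.foldl (fun acc e => acc ++ pvExcScanA t e.toList 0) [] ↔
      ∃ exc ∈ excs, ∃ p : Nat, pvOccAt t exc.toList p ∧ r = ((p:Int), (p:Int) + exc.toList.length) := by
  rw [PySem.List.foldl_append_eq_flatMap (fun e => pvExcScanA t e.toList 0) excs []]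
  simp only [List.nil_append, List.mem_flatMap, pvExcScanA_mem]
  constructor
  · rintro ⟨e, he, p, -, hocc, rfl⟩; exact ⟨e, he, p, hocc, rfl⟩
  · rintro ⟨e, he, p, hocc, rfl⟩; exact ⟨e, he, p, Nat.zero_le _, hocc, rfl⟩

-- A's in_exception test over the collected ranges, characterised by pvCovered
theorem pvBlocked_iff (t : List Char) (excs : List String) (pos : Int) (L : Nat) :
    ((excs.foldl (fun acc e => acc ++ pvExcScanA t e.toList 0) []).any (fun r =>
      (decide (r.1 ≤ pos) && decide (pos < r.2)) ||
      (decide (r.1 < pos + (L : Int)) && decide (pos + (L : Int) ≤ r.2))) = true) ↔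
      (pvCovered t excs pos ∨ pvCovered t excs (pos + (L : Int) - 1)) := by
  rw [List.any_eq_true]
  constructor
  · rintro ⟨r, hr, hc⟩
    obtain ⟨e, he, p, hocc, rfl⟩ := (pvRanges_mem t excs r).1 hr
    simp only [Bool.or_eq_true, Bool.and_eq_true, decide_eq_true_eq] at hc
    rcases hc with ⟨h1, h2⟩ | ⟨h1, h2⟩
    · exact Or.inl ⟨e, he, p, hocc, h1, h2⟩
    · exact Or.inr ⟨e, he, p, hocc, by omega, by omega⟩
  · rintro (⟨e, he, p, hocc, h1, h2⟩ | ⟨e, he, p, hocc, h1, h2⟩)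
    · refine ⟨((p:Int), (p:Int) + e.toList.length), (pvRanges_mem t excs _).2 ⟨e, he, p, hocc, rfl⟩, ?_⟩
      simp only [Bool.or_eq_true, Bool.and_eq_true, decide_eq_true_eq]
      exact Or.inl ⟨h1, h2⟩
    · refine ⟨((p:Int), (p:Int) + e.toList.length), (pvRanges_mem t excs _).2 ⟨e, he, p, hocc, rfl⟩, ?_⟩
      simp only [Bool.or_eq_true, Bool.and_eq_true, decide_eq_true_eq]
      exact Or.inr ⟨by omega, by omega⟩

-- A's keyword while-loop finds an uncovered occurrence at or after start iff one exists
theorem pvKwScanA_iff (t kw : List Char) (excs : List String) (start : Nat) :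
    pvKwScanA t kw (excs.foldl (fun acc e => acc ++ pvExcScanA t e.toList 0) []) start = true ↔
      ∃ p : Nat, start ≤ p ∧ pvOccAt t kw p ∧
        ¬ (pvCovered t excs (p:Int) ∨ pvCovered t excs ((p:Int) + kw.length - 1)) := by
  rw [pvKwScanA]
  by_cases h : PySem.Chars.findFrom t kw (start:Int) none = -1
  · simp only [h, dite_true, Bool.false_eq_true, false_iff]
    rintro ⟨p, hsp, hocc, -⟩
    exact pvNoOcc t kw start h p hsp hocc
  · obtain ⟨hk, hge, hle⟩ := pvFindFrom_bounds t kw start h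
    have spec := PySem.Chars.findFrom_natCast_spec t kw start hk h
    set pos := PySem.Chars.findFrom t kw (start:Int) none with hpos
    have hposN : ((pos.toNat : Int)) = pos := Int.toNat_of_nonneg (by omega)
    rw [dif_neg h]
    have hoccpos : pvOccAt t kw pos.toNat := by
      refine ⟨?_, spec.2.1⟩
      have hl2 := spec.2.1.length_le
      simp only [List.length_drop] at hl2
      omega
    by_cases hb : (excs.foldl (fun acc e => acc ++ pvExcScanA t e.toList 0) []).any (fun r =>
      (decide (r.1 ≤ pos) && decide (pos < r.2)) ||
      (decide (r.1 < pos + (kw.length : Int)) && decide (pos + (kw.length : Int) ≤ r.2))) = true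
    · rw [if_pos hb, pvKwScanA_iff t kw excs (pos.toNat + 1)]
      rw [← hposN, pvBlocked_iff t excs _ kw.length] at hb
      constructor
      · rintro ⟨p, hsp, hocc, hgood⟩; exact ⟨p, by omega, hocc, hgood⟩
      · rintro ⟨p, hsp, hocc, hgood⟩
        by_cases hp : pos.toNat + 1 ≤ p
        · exact ⟨p, hp, hocc, hgood⟩
        · have hpe : p = pos.toNat := by
            rcases Nat.lt_or_ge p pos.toNat with hlt | hge2
            · exact absurd hocc.2 (spec.2.2 p hsp hlt)
            · omega
          subst hpe
          exact absurd hb hgood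
    · rw [if_neg hb]
      simp only [true_iff]
      rw [← hposN, pvBlocked_iff t excs _ kw.length] at hb
      exact ⟨pos.toNat, by omega, hoccpos, hb⟩
termination_by t.length + 1 - start
decreasing_by
  have := pvFindFrom_bounds t kw start h
  omega

-- max(xs, default=0) compared against a nonnegative bound
theorem pvMaxD_lt_iff (xs : List Int) (c : Int) (hc : 0 ≤ c) :
    c < PySem.List.maxD xs (fun x => x) 0 ↔ ∃ x ∈ xs, c < x := by
  unfold PySem.List.maxD
  cases hm : PySem.List.max? xs (fun x => x) with
  | none =>
    have := (PySem.List.max?_eq_none_iff xs (fun x => x)).1 hm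
    subst this
    simp; omega
  | some m =>
    simp only [Option.getD_some]
    constructor
    · intro h; exact ⟨m, PySem.List.max?_mem hm, h⟩
    · rintro ⟨x, hx, hcx⟩
      have := PySem.List.max?_isMax hm x hx
      omega

-- t[p:p+len(e)] == e  is  "e occurs at p"
theorem pvSlice_eq_iff (t e : List Char) (p : Nat) :
    (PySem.List.slice t (some (p:Int)) (some ((p:Int) + (e.length:Int))) = e) ↔ e <+: t.drop p := by
  rw [PySem.List.slice_natCast_add t p e.length]
  constructor
  · intro h; rw [List.prefix_iff_eq_take]; exact h.symm
  · intro h; exact ((List.prefix_iff_eq_take).1 h).symm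

-- B's reach[] entries, characterised by exception occurrences
theorem pvReach_gt_iff (t : List Char) (excs : List String) (i j : Nat)
    (hj : j < t.length) (hij : j ≤ i) :
    ((i:Int) < PySem.List.pyGetD (pvReachB t excs (t.length:Int)) (j:Int) 0) ↔
      ∃ e ∈ excs, e.toList <+: t.drop j ∧ (i:Int) < (j:Int) + e.toList.length := by
  have hlen : (pvReachB t excs (t.length:Int)).length = t.length := by
    simp [pvReachB, PySem.List.length_pyRange_one]
  rw [PySem.List.pyGetD_eq_getElem _ _ (by omega) (by rw [hlen]; exact_mod_cast hj)]
  simp only [pvReachB, Int.toNat_natCast, List.getElem_map, PySem.List.getElem_pyRange_one,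
    zero_add]
  rw [show ∀ a b : Int, (i:Int) < a + b ↔ (i:Int) - a < b from by intros; omega]
  rw [pvMaxD_lt_iff _ _ (by omega)]
  simp only [List.mem_map, List.mem_filter]
  constructor
  · rintro ⟨x, ⟨e, ⟨he, hsl⟩, rfl⟩, hlt⟩
    rw [show PySem.Str.len e = ((e.toList.length : Nat) : Int) from rfl] at hsl
    rw [decide_eq_true_eq, pvSlice_eq_iff t e.toList j] at hsl
    exact ⟨e, he, hsl, by simpa [PySem.Str.len] using (by omega : (i:Int) < (j:Int) + PySem.Str.len e)⟩
  · rintro ⟨e, he, hpre, hlt⟩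
    refine ⟨PySem.Str.len e, ⟨e, ⟨he, ?_⟩, rfl⟩, by simp [PySem.Str.len] at hlt ⊢; omega⟩
    rw [show PySem.Str.len e = ((e.toList.length : Nat) : Int) from rfl]
    rw [decide_eq_true_eq, pvSlice_eq_iff t e.toList j]
    exact hpre

-- the list B's sweep loop appends to cov, as a standalone recursion
def pvCovGo (reach : List Int) (far : Int) : List Int → List Bool
  | [] => []
  | i :: l =>
    let far' := if PySem.List.pyGetD reach i 0 > far then PySem.List.pyGetD reach i 0 else far
    decide (far' > i) :: pvCovGo reach far' l

theorem pvCovB_fold (reach : List Int) (l : List Int) (far : Int) (acc : List Bool) :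
    (l.foldl (fun st i =>
      let far := if PySem.List.pyGetD reach i 0 > st.1 then PySem.List.pyGetD reach i 0 else st.1
      (far, st.2 ++ [decide (far > i)])) (far, acc)).2 = acc ++ pvCovGo reach far l := by
  induction l generalizing far acc with
  | nil => simp [pvCovGo]
  | cons i l ih => simp [pvCovGo, ih]

-- element i of the sweep output: the running maximum has passed i
theorem pvCovGo_get (reach : List Int) (n : Int) (a i : Nat) (far : Int)
    (hai : a ≤ i) (hin : (i:Int) < n) :
    ∃ b : Bool, (pvCovGo reach far (PySem.List.pyRange (a:Int) n))[i - a]? = some b ∧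
      (b = true ↔ ((i:Int) < far ∨
        ∃ j : Nat, a ≤ j ∧ j ≤ i ∧ (i:Int) < PySem.List.pyGetD reach (j:Int) 0)) := by
  have han : (a:Int) < n := by omega
  rw [PySem.List.pyRange_one_cons han]
  simp only [pvCovGo]
  set rA := PySem.List.pyGetD reach (a:Int) 0 with hrA
  rcases Nat.eq_or_lt_of_le hai with rfl | hlt
  · refine ⟨decide ((a:Int) < if far < rA then rA else far), by simp, ?_⟩
    simp only [decide_eq_true_eq]
    constructor
    · intro h
      split_ifs at h with hf
      · exact Or.inr ⟨a, le_refl a, le_refl a, h⟩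
      · exact Or.inl h
    · rintro (h | ⟨j, h1, h2, h3⟩)
      · split_ifs with hf <;> omega
      · have : j = a := by omega
        subst this
        rw [← hrA] at h3
        split_ifs with hf <;> omega
  · have hidx : i - a = (i - (a + 1)) + 1 := by omega
    rw [hidx]
    obtain ⟨b, hb, hiff⟩ := pvCovGo_get reach n (a + 1) i
      (if rA > far then rA else far) (by omega) hin
    push_cast at hb
    refine ⟨b, by simpa using hb, ?_⟩
    rw [hiff]
    constructor
    · rintro (h | ⟨j, h1, h2, h3⟩)
      · split_ifs at h with hf
        · exact Or.inr ⟨a, le_refl a, by omega, by rw [← hrA]; omega⟩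
        · exact Or.inl h
      · exact Or.inr ⟨j, by omega, h2, h3⟩
    · rintro (h | ⟨j, h1, h2, h3⟩)
      · left; split_ifs with hf <;> omega
      · rcases Nat.eq_or_lt_of_le h1 with rfl | hja
        · rw [← hrA] at h3
          left; split_ifs with hf <;> omega
        · exact Or.inr ⟨j, by omega, h2, h3⟩
termination_by i - a

theorem pvCov_get_iff (reach : List Int) (n : Int) (i : Nat) (hin : (i:Int) < n) :
    (PySem.List.pyGetD (pvCovB reach n) (i:Int) false = true ↔
      ∃ j : Nat, j ≤ i ∧ (i:Int) < PySem.List.pyGetD reach (j:Int) 0) := by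
  obtain ⟨b, hb, hiff⟩ := pvCovGo_get reach n 0 i 0 (Nat.zero_le i) hin
  simp only [Nat.cast_zero, Nat.sub_zero] at hb
  rw [pvCovB, pvCovB_fold reach _ 0 [], List.nil_append, PySem.List.pyGetD_natCast,
      List.getD_eq_getElem?_getD, hb]
  simp only [Option.getD_some, hiff]
  constructor
  · rintro (h | ⟨j, -, h2, h3⟩)
    · omega
    · exact ⟨j, h2, h3⟩
  · rintro ⟨j, h2, h3⟩
    exact Or.inr ⟨j, Nat.zero_le j, h2, h3⟩

-- B's mask agrees with pvCovered on in-range positions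
theorem pvCovered_mask (t : List Char) (excs : List String) (i : Nat) (hin : i < t.length) :
    PySem.List.pyGetD (pvCovB (pvReachB t excs (t.length:Int)) (t.length:Int)) (i:Int) false = true ↔
      pvCovered t excs (i:Int) := by
  rw [pvCov_get_iff _ _ i (by exact_mod_cast hin)]
  constructor
  · rintro ⟨j, hj, hlt⟩
    rw [pvReach_gt_iff t excs i j (by omega) hj] at hlt
    obtain ⟨e, he, hpre, hbd⟩ := hlt
    refine ⟨e, he, j, ⟨?_, hpre⟩, by exact_mod_cast hj, hbd⟩
    have := hpre.length_le
    simp only [List.length_drop] at this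
    omega
  · rintro ⟨e, he, j, ⟨hocc1, hocc2⟩, hji, hbd⟩
    have hj : j ≤ i := by exact_mod_cast hji
    exact ⟨j, hj, (pvReach_gt_iff t excs i j (by omega) hj).2 ⟨e, he, hocc2, hbd⟩⟩

theorem pvCovered_bounds (t : List Char) (excs : List String) (i : Int)
    (h : pvCovered t excs i) : 0 ≤ i ∧ i < (t.length:Int) := by
  obtain ⟨e, -, j, ⟨h1, -⟩, h3, h4⟩ := h
  constructor
  · omega
  · have : ((j + e.toList.length : Nat) : Int) ≤ (t.length:Int) := by exact_mod_cast h1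
    push_cast at this
    omega

-- B's free(i) is exactly "position i is not covered"
theorem pvFree_iff (t : List Char) (excs : List String) (i : Int) :
    (pvFreeB (pvCovB (pvReachB t excs (t.length:Int)) (t.length:Int)) (t.length:Int) i = true ↔
      ¬ pvCovered t excs i) := by
  unfold pvFreeB
  by_cases h1 : 0 ≤ i
  · by_cases h2 : i < (t.length:Int)
    · have hi : i = ((i.toNat : Nat) : Int) := by omega
      rw [hi]
      have hmask := pvCovered_mask t excs i.toNat (by omega)
      have hd1 : decide ((0:Int) ≤ ((i.toNat:Nat):Int)) = true := by simp
      have hd2 : decide (((i.toNat:Nat):Int) < (t.length:Int)) = true := by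
        simp only [decide_eq_true_eq]; omega
      simp only [hd1, hd2, Bool.true_and, Bool.not_eq_true']
      rw [← hmask]
      constructor
      · intro h hc; rw [hc] at h; simp at h
      · intro h
        cases hb : PySem.List.pyGetD (pvCovB (pvReachB t excs (t.length:Int)) (t.length:Int)) ((i.toNat:Nat):Int) false
        · rfl
        · exact absurd hb h
    · have : decide (i < (t.length:Int)) = false := by simp; omega
      simp only [this, Bool.and_false, Bool.false_and, Bool.not_false, true_iff]
      intro hc
      exact h2 (pvCovered_bounds t excs i hc).2
  · have : decide (0 ≤ i) = false := by simp; omega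
    simp only [this, Bool.false_and, Bool.not_false, true_iff]
    intro hc
    exact h1 (pvCovered_bounds t excs i hc).1

-- B's per-keyword any(...) test, characterised by pvGood
theorem pvAltAny_iff (t : List Char) (excs : List String) (kw : String) :
    (((PySem.List.pyRange 0 ((PySem.Chars.len t) - PySem.Str.len kw + 1)).any (fun p =>
        decide (PySem.List.slice t (some p) (some (p + PySem.Str.len kw)) = kw.toList) &&
        pvFreeB (pvCovB (pvReachB t excs (PySem.Chars.len t)) (PySem.Chars.len t)) (PySem.Chars.len t) p &&
        pvFreeB (pvCovB (pvReachB t excs (PySem.Chars.len t)) (PySem.Chars.len t)) (PySem.Chars.len t) (p + PySem.Str.len kw - 1)) = true)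
      ↔ pvGood t excs kw.toList) := by
  have hlen : PySem.Chars.len t = (t.length : Int) := rfl
  have hkw : PySem.Str.len kw = (kw.toList.length : Int) := rfl
  rw [List.any_eq_true]
  constructor
  · rintro ⟨p, hp, hc⟩
    rw [PySem.List.mem_pyRange_one] at hp
    simp only [Bool.and_eq_true, decide_eq_true_eq] at hc
    obtain ⟨⟨hsl, hf1⟩, hf2⟩ := hc
    have hpn : p = ((p.toNat : Nat) : Int) := by omega
    rw [hpn, hkw, pvSlice_eq_iff t kw.toList p.toNat] at hsl
    have hple : (p.toNat : Int) ≤ (t.length : Int) := by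
      rw [hlen, hkw] at hp; omega
    have hbd : p.toNat + kw.toList.length ≤ t.length := by
      have := hsl.length_le
      simp only [List.length_drop] at this
      omega
    refine ⟨p.toNat, ⟨hbd, hsl⟩, ?_⟩
    rw [hlen] at hf1 hf2
    rw [pvFree_iff] at hf1 hf2
    rintro (h | h)
    · exact hf1 (by rwa [hpn])
    · exact hf2 (by rwa [hkw, hpn])
  · rintro ⟨p, ⟨hbd, hpre⟩, hgood⟩
    refine ⟨(p:Int), ?_, ?_⟩
    · rw [PySem.List.mem_pyRange_one, hlen, hkw]
      constructor
      · omega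
      · have : ((p + kw.toList.length : Nat) : Int) ≤ (t.length : Int) := by exact_mod_cast hbd
        push_cast at this
        omega
    · simp only [Bool.and_eq_true, decide_eq_true_eq]
      refine ⟨⟨?_, ?_⟩, ?_⟩
      · rw [hkw, pvSlice_eq_iff t kw.toList p]
        exact hpre
      · rw [hlen, pvFree_iff]
        intro hc; exact hgood (Or.inl hc)
      · rw [hlen, hkw, pvFree_iff]
        intro hc; exact hgood (Or.inr hc)

-- both ports return the same list of keywords
theorem pvPorts_eq (text : String) (kws excs : List String) :
    text_contains_keyword_py text kws excs = text_contains_keyword_py_alt text kws excs := by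
  simp only [text_contains_keyword_py, text_contains_keyword_py_alt]
  rw [PySem.List.foldl_append_if (fun kw : String =>
        pvKwScanA (PySem.Chars.lower text.toList) kw.toList
          (excs.foldl (fun acc exc => acc ++ pvExcScanA (PySem.Chars.lower text.toList) exc.toList 0) []) 0)
      (fun kw => kw) kws []]
  rw [PySem.List.foldl_append_if (fun kw : String =>
        (PySem.List.pyRange 0 (PySem.Chars.len (PySem.Chars.lower text.toList) - PySem.Str.len kw + 1)).any (fun p =>
          decide (PySem.List.slice (PySem.Chars.lower text.toList) (some p) (some (p + PySem.Str.len kw)) = kw.toList) &&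
          pvFreeB (pvCovB (pvReachB (PySem.Chars.lower text.toList) excs (PySem.Chars.len (PySem.Chars.lower text.toList))) (PySem.Chars.len (PySem.Chars.lower text.toList))) (PySem.Chars.len (PySem.Chars.lower text.toList)) p &&
          pvFreeB (pvCovB (pvReachB (PySem.Chars.lower text.toList) excs (PySem.Chars.len (PySem.Chars.lower text.toList))) (PySem.Chars.len (PySem.Chars.lower text.toList))) (PySem.Chars.len (PySem.Chars.lower text.toList)) (p + PySem.Str.len kw - 1)))
      (fun kw => kw) kws []]
  simp only [List.nil_append]
  congr 1
  apply List.filter_congr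
  intro kw _
  rw [Bool.eq_iff_iff]
  rw [pvKwScanA_iff _ _ _ 0, pvAltAny_iff]
  unfold pvGood
  constructor
  · rintro ⟨p, -, h⟩; exact ⟨p, h⟩
  · rintro ⟨p, h⟩; exact ⟨p, Nat.zero_le p, h⟩

-- ===== VERDICT (by name: the statement is the Claim_ definition above) =====
theorem text_contains_keyword_py_spec : Claim_equal_text_contains_keyword_py := by
  intro text keywords exceptions _
  unfold Spec_text_contains_keyword_py
  exact pvPorts_eq text keywords exceptions
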